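-- pv_equiv track=rewrite | github.com/AzChaimae/Word-Embedding-Intrinsic-Evaluation | Accuracy by categorization.py | get_true_clusters
-- ===== SOURCE A (Python) =====
-- def get_true_clusters(word_representations,word_categories):
--     true_word_clusters=[]
--     i=0
--     for row in word_categories:
--         for word in word_representations.keys():
--             if word in row[1] and word not in [true_word_clusters[i][1] for i in range(len(true_word_clusters))]:
--                 true_word_clusters.append([row[0],word,i])
--         i+=1
--     return [true_word_clusters[i][2] for i in range(len(true_word_clusters))]
-- ===== SOURCE B (Python) =====
-- def get_true_clusters(word_representations, word_categories):
--     assigned = set()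
--     result = []
--     for i, row in enumerate(word_categories):
--         for word in row[1]:
--             if word in word_representations and word not in assigned:
--                 assigned.add(word)
--                 result.append(i)
--     return result
-- ===== Notes on version B (the rewrite author's own statement) =====
-- stated objective: faster
-- what changed: Inverts the loops (iterate each category's own words, test dict membership) and replaces A's per-word rebuild of the already-assigned list with an O(1) 'assigned' set, appending the category index directly instead of building triples and projecting.
import Mathlib
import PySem

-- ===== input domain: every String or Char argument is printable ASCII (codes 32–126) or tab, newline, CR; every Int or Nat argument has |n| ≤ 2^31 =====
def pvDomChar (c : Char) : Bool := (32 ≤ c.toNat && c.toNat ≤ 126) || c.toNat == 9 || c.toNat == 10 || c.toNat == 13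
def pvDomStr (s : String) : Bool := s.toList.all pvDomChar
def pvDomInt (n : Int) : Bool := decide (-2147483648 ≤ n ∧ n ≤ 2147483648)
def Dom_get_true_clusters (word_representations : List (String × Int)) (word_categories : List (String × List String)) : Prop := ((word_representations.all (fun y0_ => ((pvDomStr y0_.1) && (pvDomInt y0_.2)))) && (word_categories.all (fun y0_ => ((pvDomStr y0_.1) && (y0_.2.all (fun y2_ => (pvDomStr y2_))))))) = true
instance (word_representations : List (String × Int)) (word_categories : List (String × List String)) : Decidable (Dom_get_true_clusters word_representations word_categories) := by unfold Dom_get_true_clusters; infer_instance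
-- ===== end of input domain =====

-- B inverts A's loops: it walks each category's word list with an O(1) 'assigned' set instead of
-- scanning all dict keys and rebuilding the assigned-word list per word; same returned index list.


-- ===== PORT A =====
-- word_representations.keys(): the dict's keys are the DISTINCT first components in first-insertion
-- order, i.e. PySem.Set.ofList of the firsts (exact for dict(pairs)).
def get_true_clusters (word_representations : List (String × Int)) (word_categories : List (String × List String)) : List Int :=
  let keys : PySem.Set String := PySem.Set.ofList (word_representations.map (·.1))
  -- true_word_clusters=[]; i=0; nested for-loops appending [row[0], word, i]
  let st := word_categories.foldl
    (fun (st : List (String × String × Int) × Int) row =>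
      (keys.foldl
        (fun acc word =>
          if word ∈ row.2 ∧ ¬ word ∈ acc.map (fun t => t.2.1) then
            acc ++ [(row.1, word, st.2)]
          else acc) st.1,
       st.2 + 1))
    ([], 0)
  -- [true_word_clusters[i][2] for i in range(len(true_word_clusters))]
  st.1.map (fun t => t.2.2)

-- ===== PORT B =====
-- 'word in word_representations' is membership in the dict's key set (the distinct firsts).
def get_true_clusters_alt (word_representations : List (String × Int)) (word_categories : List (String × List String)) : List Int :=
  let keys : PySem.Set String := PySem.Set.ofList (word_representations.map (·.1))
  let st := (PySem.List.enumerate word_categories).foldl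
    (fun (st : PySem.Set String × List Int) p =>
      p.2.2.foldl
        (fun (st : PySem.Set String × List Int) word =>
          if word ∈ keys ∧ ¬ word ∈ st.1 then
            (PySem.Set.add st.1 word, st.2 ++ [p.1])
          else st) st)
    (PySem.Set.empty, [])
  st.2

-- ===== PRECONDITION & SPEC =====
def Spec_get_true_clusters (word_representations : List (String × Int)) (word_categories : List (String × List String)) (out : List Int) : Prop := out = get_true_clusters_alt word_representations word_categories
instance (word_representations : List (String × Int)) (word_categories : List (String × List String)) (out : List Int) : Decidable (Spec_get_true_clusters word_representations word_categories out) := by unfold Spec_get_true_clusters; infer_instance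

-- ===== CLAIM (what is proved, stated in full; the proofs are below) =====
def Claim_equal_get_true_clusters : Prop := ∀ (word_representations : List (String × Int)) (word_categories : List (String × List String)), Dom_get_true_clusters word_representations word_categories → Spec_get_true_clusters word_representations word_categories (get_true_clusters word_representations word_categories)

-- ===== LEMMAS AND PROOFS =====

-- number of words of cat that are dict keys and not yet assigned (as a finite set)
def pvNewCount (keys cat assigned : List String) : Nat :=
  (cat.toFinset.filter (fun w => w ∈ keys ∧ ¬ w ∈ assigned)).card

-- A's inner loop appends exactly the unassigned keys of the category, in key order
theorem pvA_inner (keys : List String) (cat : List String) (name : String) (i : Int)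
    (acc : List (String × String × Int)) (hnd : keys.Nodup) :
    keys.foldl
      (fun acc word =>
        if word ∈ cat ∧ ¬ word ∈ acc.map (fun t => t.2.1) then
          acc ++ [(name, word, i)]
        else acc) acc
    = acc ++ (keys.filter
        (fun w => decide (w ∈ cat ∧ ¬ w ∈ acc.map (fun t => t.2.1)))).map
        (fun w => (name, w, i)) := by
  induction keys generalizing acc with
  | nil => simp
  | cons w ks ih =>
    rcases List.nodup_cons.mp hnd with ⟨hw, hks⟩
    simp only [List.foldl_cons]
    by_cases hc : w ∈ cat ∧ ¬ w ∈ acc.map (fun t => t.2.1)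
    · rw [if_pos hc, List.filter_cons_of_pos (by simpa using hc), ih _ hks]
      have hcong : ks.filter
          (fun u => decide (u ∈ cat ∧ ¬ u ∈ ((acc ++ [(name, w, i)]).map (fun t => t.2.1))))
          = ks.filter (fun u => decide (u ∈ cat ∧ ¬ u ∈ acc.map (fun t => t.2.1))) := by
        apply List.filter_congr
        intro u hu
        have hne : u ≠ w := fun h => hw (h ▸ hu)
        have hiff : (u ∈ (acc ++ [(name, w, i)]).map (fun t => t.2.1))
            ↔ (u ∈ acc.map (fun t => t.2.1)) := by simp [hne]
        exact decide_eq_decide.mpr (by rw [hiff])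
      rw [hcong]
      simp
    · rw [if_neg hc, List.filter_cons_of_neg (by simpa using hc)]
      exact ih _ hks

-- B's inner loop: the set gains the category words that are keys, the output gains i repeated
-- pvNewCount times
theorem pvB_inner (keys : List String) (cat : List String) (i : Int)
    (S : PySem.Set String) (res : List Int) :
    cat.foldl
      (fun (st : PySem.Set String × List Int) word =>
        if word ∈ keys ∧ ¬ word ∈ st.1 then
          (PySem.Set.add st.1 word, st.2 ++ [i])
        else st) (S, res)
    = (PySem.Set.update S (cat.filter (fun w => decide (w ∈ keys))),
       res ++ List.replicate (pvNewCount keys cat S) i) := by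
  induction cat generalizing S res with
  | nil => simp [pvNewCount, PySem.Set.update]
  | cons w cs ih =>
    simp only [List.foldl_cons]
    by_cases hk : w ∈ keys
    · by_cases hs : w ∈ S
      · -- skipped: already assigned
        rw [if_neg (by tauto), ih]
        have h1 : PySem.Set.update S ((w :: cs).filter (fun w => decide (w ∈ keys)))
            = PySem.Set.update S (cs.filter (fun w => decide (w ∈ keys))) := by
          rw [List.filter_cons_of_pos (by simpa using hk), PySem.Set.update_cons,
            PySem.Set.add_of_mem hs]
        have h2 : pvNewCount keys (w :: cs) S = pvNewCount keys cs S := by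
          unfold pvNewCount
          rw [List.toFinset_cons, Finset.filter_insert, if_neg (by simp [hs])]
        rw [h1, h2]
      · -- newly assigned
        rw [if_pos ⟨hk, hs⟩, ih]
        have h1 : PySem.Set.update (PySem.Set.add S w) (cs.filter (fun w => decide (w ∈ keys)))
            = PySem.Set.update S ((w :: cs).filter (fun w => decide (w ∈ keys))) := by
          rw [List.filter_cons_of_pos (by simpa using hk), PySem.Set.update_cons]
        have h2 : pvNewCount keys cs (PySem.Set.add S w) + 1 = pvNewCount keys (w :: cs) S := by
          unfold pvNewCount
          have hset : cs.toFinset.filter (fun u => u ∈ keys ∧ ¬ u ∈ PySem.Set.add S w)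
              = ((w :: cs).toFinset.filter (fun u => u ∈ keys ∧ ¬ u ∈ S)).erase w := by
            ext u
            simp only [Finset.mem_filter, Finset.mem_erase, List.mem_toFinset, List.mem_cons,
              PySem.Set.mem_add]
            tauto
          rw [hset]
          have hmem : w ∈ (w :: cs).toFinset.filter (fun u => u ∈ keys ∧ ¬ u ∈ S) := by
            simp [hk, hs]
          rw [Finset.card_erase_of_mem hmem]
          have := Finset.card_pos.mpr ⟨w, hmem⟩
          omega
        rw [h1, ← h2]
        simp [List.replicate_succ]
    · -- not a dict key: skipped everywhere
      rw [if_neg (by tauto), ih]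
      have h1 : (w :: cs).filter (fun w => decide (w ∈ keys))
          = cs.filter (fun w => decide (w ∈ keys)) :=
        List.filter_cons_of_neg (by simpa using hk)
      have h2 : pvNewCount keys (w :: cs) S = pvNewCount keys cs S := by
        unfold pvNewCount
        rw [List.toFinset_cons, Finset.filter_insert, if_neg (by simp [hk])]
      rw [h1, h2]

-- A's appended batch has the same length as B's count, given matching assigned-membership
theorem pvCount_eq (keys cat assigned : List String) (hnd : keys.Nodup) :
    (keys.filter (fun w => decide (w ∈ cat ∧ ¬ w ∈ assigned))).length
      = pvNewCount keys cat assigned := by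
  unfold pvNewCount
  have hsub : (keys.filter (fun w => decide (w ∈ cat ∧ ¬ w ∈ assigned))).Nodup :=
    hnd.filter _
  rw [← List.toFinset_card_of_nodup hsub]
  congr 1
  ext u
  simp only [List.mem_toFinset, List.mem_filter, Finset.mem_filter, decide_eq_true_eq]
  tauto

-- pvNewCount only depends on the membership of 'assigned'
theorem pvNewCount_congr (keys cat : List String) {s t : List String}
    (h : ∀ w, w ∈ s ↔ w ∈ t) : pvNewCount keys cat s = pvNewCount keys cat t := by
  unfold pvNewCount
  congr 1
  ext u
  simp [h u]

-- the outer loop invariant: A's cluster list projects onto B's state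
theorem pvOuter (keys : List String) (hnd : keys.Nodup)
    (wc : List (String × List String)) (i : Int)
    (acc : List (String × String × Int)) (S : PySem.Set String) (res : List Int)
    (hmem : ∀ w, w ∈ S ↔ w ∈ acc.map (fun t => t.2.1))
    (hres : res = acc.map (fun t => t.2.2)) :
    (wc.foldl
      (fun (st : List (String × String × Int) × Int) row =>
        (keys.foldl
          (fun acc word =>
            if word ∈ row.2 ∧ ¬ word ∈ acc.map (fun t => t.2.1) then
              acc ++ [(row.1, word, st.2)]
            else acc) st.1,
         st.2 + 1))
      (acc, i)).1.map (fun t => t.2.2)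
    = ((PySem.List.enumerate wc i).foldl
      (fun (st : PySem.Set String × List Int) p =>
        p.2.2.foldl
          (fun (st : PySem.Set String × List Int) word =>
            if word ∈ keys ∧ ¬ word ∈ st.1 then
              (PySem.Set.add st.1 word, st.2 ++ [p.1])
            else st) st)
      (S, res)).2 := by
  induction wc generalizing i acc S res with
  | nil => simpa [PySem.List.enumerate] using hres.symm
  | cons row rest ih =>
    rw [PySem.List.enumerate_cons]
    simp only [List.foldl_cons]
    rw [pvA_inner keys row.2 row.1 i acc hnd, pvB_inner keys row.2 i S res]
    apply ih
    · intro w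
      rw [PySem.Set.mem_update]
      simp only [List.map_append, List.mem_append, List.map_map, Function.comp_def,
        List.map_id', List.mem_filter, decide_eq_true_eq, hmem w]
      tauto
    · rw [hres]
      simp only [List.map_append, List.map_map]
      congr 1
      rw [pvNewCount_congr keys row.2 (fun w => hmem w),
        ← pvCount_eq keys row.2 (acc.map (fun t => t.2.1)) hnd]
      simp [Function.comp_def, List.map_const']

-- ===== VERDICT (by name: the statement is the Claim_ definition above) =====
theorem get_true_clusters_spec : Claim_equal_get_true_clusters := by
  intro wr wc _
  unfold Spec_get_true_clusters get_true_clusters get_true_clusters_alt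
  exact pvOuter _ (PySem.Set.nodup_ofList _) wc 0 [] PySem.Set.empty []
    (by simp [PySem.Set.empty]) rfl
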